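-- pv_equiv track=rewrite | github.com/neuroneural/gunfoldsdocs | bfutils.py | bidirected_inc
-- ===== SOURCE A (Python) =====
-- import itertools
--
-- def bidirected_inc(G, D):
--     """ helper function for determining bidirected edges in an undersampled
--         graph given a previously undersampled graph """
--     for vert1 in G:
--         # transfer old bidirected edges
--         for vert2 in D[vert1]:
--             if D[vert1][vert2] in (2, 3):
--                 G[vert1][vert2] = 2 if G[vert1].get(vert2, 2) == 2 else 3
--         # new bidirected edges
--         edges = [ e for e in D[vert1] if D[vert1][e] in (1,3) ]
--         for pair in itertools.permutations(edges, 2):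
--             G[pair[0]][pair[1]] = 2 if G[pair[0]].get(pair[1], 2) == 2 else 3
--     return G
-- ===== SOURCE B (Python) =====
-- def bidirected_inc(G, D):
--     """ helper function for determining bidirected edges in an undersampled
--         graph given a previously undersampled graph """
--     # phase 1: collect the cells to mark, without touching G
--     targets = []
--     for v1 in G:
--         row = D[v1]
--         targets.extend((v1, v2) for v2, val in row.items() if val in (2, 3))
--         ch = [e for e, val in row.items() if val in (1, 3)]
--         targets.extend((a, b) for a in ch for b in ch if b != a)
--     # phase 2: apply each marked cell once (the merge depends only on the
--     # cell's original value, so duplicate writes collapse to the first one)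
--     seen = set()
--     for x, y in targets:
--         if (x, y) not in seen:
--             seen.add((x, y))
--             G[x][y] = 2 if G[x].get(y, 2) == 2 else 3
--     return G
-- ===== Notes on version B (the rewrite author's own statement) =====
-- stated objective: alternative
-- what changed: Instead of interleaving discovery with in-place merges, B first collects the full ordered list of target cells from D alone, then deduplicates it with a seen-set and applies the merge exactly once per cell; correct because the merge result depends only on the cell's pre-write value.
import Mathlib
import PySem

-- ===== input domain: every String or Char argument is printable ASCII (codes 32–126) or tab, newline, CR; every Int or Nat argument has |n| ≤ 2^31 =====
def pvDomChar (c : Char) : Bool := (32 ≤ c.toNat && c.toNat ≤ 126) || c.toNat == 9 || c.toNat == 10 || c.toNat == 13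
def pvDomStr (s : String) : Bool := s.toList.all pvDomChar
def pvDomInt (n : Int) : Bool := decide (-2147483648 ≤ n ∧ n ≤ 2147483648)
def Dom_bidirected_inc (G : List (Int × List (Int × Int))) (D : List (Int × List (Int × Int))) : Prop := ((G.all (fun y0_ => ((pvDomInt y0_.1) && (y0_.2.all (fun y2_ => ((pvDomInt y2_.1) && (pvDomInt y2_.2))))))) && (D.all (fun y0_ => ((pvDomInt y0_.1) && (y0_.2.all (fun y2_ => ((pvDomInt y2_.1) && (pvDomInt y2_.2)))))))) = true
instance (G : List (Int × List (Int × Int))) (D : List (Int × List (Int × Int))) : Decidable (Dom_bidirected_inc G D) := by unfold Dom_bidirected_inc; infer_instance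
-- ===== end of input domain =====

-- B defers the merges: it first collects the ordered list of target cells from D
-- alone, deduplicates it, then applies the merge once per cell (equivalence is
-- about the RETURN value; the Python A and B both mutate G in place).

-- Both Pythons receive dicts of dicts; we model them as PySem.Dict of PySem.Dict.
def pvWrap (L : List (Int × List (Int × Int))) : PySem.Dict Int (PySem.Dict Int Int) :=
  PySem.Dict.mk (L.map (fun p => (p.1, PySem.Dict.mk p.2)))

def pvUnwrap (g : PySem.Dict Int (PySem.Dict Int Int)) : List (Int × List (Int × Int)) :=
  g.items.map (fun p => (p.1, p.2.items))

-- G[x][y] = 2 if G[x].get(y, 2) == 2 else 3   (the shared merge line of both Pythons;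
-- on x ∉ G Python raises KeyError — excluded by Pre_, the port leaves g unchanged)
def pvWrite (g : PySem.Dict Int (PySem.Dict Int Int)) (x y : Int) : PySem.Dict Int (PySem.Dict Int Int) :=
  match g.get? x with
  | some inner => g.insert x (inner.insert y (if inner.getD y 2 = 2 then (2:Int) else 3))
  | none => g

-- ===== PORT A =====
def bidirected_inc (G : List (Int × List (Int × Int))) (D : List (Int × List (Int × Int))) : List (Int × List (Int × Int)) :=
  let g0 := pvWrap G
  let d := pvWrap D
  pvUnwrap <| g0.keys.foldl (fun g v1 =>
    match d.get? v1 with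
    | none => g      -- D[vert1] raises KeyError; excluded by Pre_
    | some dv =>
      -- transfer old bidirected edges
      let g1 := dv.keys.foldl (fun g v2 =>
        if dv.getD v2 0 == 2 || dv.getD v2 0 == 3 then pvWrite g v1 v2 else g) g
      -- new bidirected edges
      let edges := dv.keys.filter (fun e => dv.getD e 0 == 1 || dv.getD e 0 == 3)
      -- itertools.permutations(edges, 2): exact since dict keys are distinct (Pre_)
      (edges.flatMap (fun a => (edges.filter (fun b => b != a)).map (fun b => (a, b)))).foldl
        (fun g p => pvWrite g p.1 p.2) g1) g0

-- ===== PORT B =====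
def bidirected_inc_alt (G : List (Int × List (Int × Int))) (D : List (Int × List (Int × Int))) : List (Int × List (Int × Int)) :=
  let g0 := pvWrap G
  let d := pvWrap D
  -- phase 1: collect the target cells, reading only D
  let targets := g0.keys.flatMap (fun v1 =>
    match d.get? v1 with
    | none => []     -- D[v1] raises KeyError; excluded by Pre_
    | some row =>
      ((row.items.filter (fun p => p.2 == 2 || p.2 == 3)).map (fun p => (v1, p.1)))
      ++ (let ch := (row.items.filter (fun p => p.2 == 1 || p.2 == 3)).map (fun p => p.1)
          ch.flatMap (fun a => (ch.filter (fun b => b != a)).map (fun b => (a, b)))))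
  -- phase 2: apply each cell once, guarded by a seen-set
  (pvUnwrap (targets.foldl (fun acc t =>
      if PySem.Set.contains acc.1 t then acc
      else (PySem.Set.add acc.1 t, pvWrite acc.2 t.1 t.2))
    ((PySem.Set.empty : PySem.Set (Int × Int)), g0)).2)

-- ===== PRECONDITION & SPEC =====
-- Pre_ excludes (a) assoc lists with duplicate keys (in G, or in a row of D),
-- which encode no Python dict, and (b) the KeyErrors of A: a key of G missing
-- from D, or a D-child (value 1/3) of a key of G that is not itself a key of G.
def Pre_bidirected_inc (G : List (Int × List (Int × Int))) (D : List (Int × List (Int × Int))) : Prop :=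
  (G.map (·.1)).Nodup ∧
  (∀ p ∈ G, (p.2.map (·.1)).Nodup) ∧ (∀ p ∈ D, (p.2.map (·.1)).Nodup) ∧
  (∀ p ∈ G, p.1 ∈ D.map (·.1)) ∧
  (∀ p ∈ G, ∀ q ∈ D, q.1 = p.1 → ∀ r ∈ q.2, (r.2 = 1 ∨ r.2 = 3) → r.1 ∈ G.map (·.1))
instance (G : List (Int × List (Int × Int))) (D : List (Int × List (Int × Int))) : Decidable (Pre_bidirected_inc G D) := by unfold Pre_bidirected_inc; infer_instance

def pvWitness_bidirected_inc : (List (Int × List (Int × Int))) × (List (Int × List (Int × Int))) :=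
  ([(0, []), (1, [])], [(0, [(1, 3)]), (1, [])])

def Spec_bidirected_inc (G : List (Int × List (Int × Int))) (D : List (Int × List (Int × Int))) (out : List (Int × List (Int × Int))) : Prop := out = bidirected_inc_alt G D
instance (G : List (Int × List (Int × Int))) (D : List (Int × List (Int × Int))) (out : List (Int × List (Int × Int))) : Decidable (Spec_bidirected_inc G D out) := by unfold Spec_bidirected_inc; infer_instance

-- ===== CLAIM (what is proved, stated in full; the proofs are below) =====
def Claim_equal_bidirected_inc : Prop := ∀ (G : List (Int × List (Int × Int))) (D : List (Int × List (Int × Int))), Dom_bidirected_inc G D → Pre_bidirected_inc G D → Spec_bidirected_inc G D (bidirected_inc G D)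

-- ===== LEMMAS AND PROOFS =====

-- uncurried write, the common step of both sides
def pvW (g : PySem.Dict Int (PySem.Dict Int Int)) (t : Int × Int) : PySem.Dict Int (PySem.Dict Int Int) :=
  pvWrite g t.1 t.2

-- the cell (t.1, t.2) of g, as stored
def pvRd (g : PySem.Dict Int (PySem.Dict Int Int)) (t : Int × Int) : Option Int :=
  (g.get? t.1).bind (fun inner => inner.get? t.2)

-- well-formed dict-of-dicts: distinct keys at both levels
def pvWF (g : PySem.Dict Int (PySem.Dict Int Int)) : Prop :=
  g.keys.Nodup ∧ ∀ p ∈ g.items, p.2.keys.Nodup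

-- first-occurrence dedup relative to an already-seen list
def pvDD (S : List (Int × Int)) : List (Int × Int) → List (Int × Int)
  | [] => []
  | t :: L => if t ∈ S then pvDD S L else t :: pvDD (t :: S) L

theorem pvDictInsertSelf {ν : Type} (d : PySem.Dict Int ν) (k : Int) (v : ν)
    (hnd : d.keys.Nodup) (h : d.get? k = some v) : d.insert k v = d := by
  apply PySem.Dict.ext
  have hc : d.contains k = true := by
    rw [PySem.Dict.contains_eq_isSome_get?, h]; rfl
  rw [PySem.Dict.items_insert_of_contains _ _ hc]
  have hpt : ∀ p ∈ d.items, (if p.1 == k then (k, v) else p) = p := by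
    intro p hp
    obtain ⟨pk, pv⟩ := p
    by_cases hk : pk = k
    · subst hk
      have h2 := PySem.Dict.get?_of_mem_items d hp hnd
      rw [h] at h2
      simp [Option.some_injective _ h2]
    · simp [hk]
  rw [List.map_congr_left hpt]
  exact List.map_id _

theorem pvWrite_keys (g : PySem.Dict Int (PySem.Dict Int Int)) (x y : Int) :
    (pvWrite g x y).keys = g.keys := by
  unfold pvWrite
  cases h : g.get? x with
  | none => rfl
  | some inner =>
    have hc : g.contains x = true := by
      rw [PySem.Dict.contains_eq_isSome_get?, h]; rfl
    exact PySem.Dict.keys_insert_of_contains _ _ hc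

theorem pvWF_write (g : PySem.Dict Int (PySem.Dict Int Int)) (x y : Int)
    (h : pvWF g) : pvWF (pvWrite g x y) := by
  obtain ⟨h1, h2⟩ := h
  refine ⟨by rw [pvWrite_keys]; exact h1, ?_⟩
  intro p hp
  unfold pvWrite at hp
  cases hg : g.get? x with
  | none => rw [hg] at hp; exact h2 p hp
  | some inner =>
    rw [hg] at hp
    rcases (PySem.Dict.mem_items_insert _ _ _ _).1 hp with hnew | hold
    · subst hnew
      have hin : (x, inner) ∈ g.items := PySem.Dict.mem_items_of_get?_eq_some g hg
      exact PySem.Dict.nodup_keys_insert _ _ _ (h2 _ hin)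
    · exact h2 p hold.1

theorem pvRd_write_other (g : PySem.Dict Int (PySem.Dict Int Int)) (t t' : Int × Int)
    (h : t' ≠ t) : pvRd (pvW g t) t' = pvRd g t' := by
  unfold pvW pvWrite pvRd
  cases hg : g.get? t.1 with
  | none => rfl
  | some inner =>
    rw [PySem.Dict.get?_insert]
    by_cases h1 : t'.1 = t.1
    · have h2 : t'.2 ≠ t.2 := by
        intro h2; exact h (Prod.ext h1 h2)
      rw [if_pos h1, h1, hg]
      simp only [Option.bind_some, PySem.Dict.get?_insert, if_neg h2]
    · rw [if_neg h1]

theorem pvRd_write_self (g : PySem.Dict Int (PySem.Dict Int Int)) (t : Int × Int)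
    (h : (g.get? t.1).isSome) :
    pvRd (pvW g t) t = some 2 ∨ pvRd (pvW g t) t = some 3 := by
  unfold pvW pvWrite pvRd
  cases hg : g.get? t.1 with
  | none => rw [hg] at h; simp at h
  | some inner =>
    rw [PySem.Dict.get?_insert_self]
    simp only [Option.bind_some, PySem.Dict.get?_insert_self]
    by_cases h2 : inner.getD t.2 2 = 2
    · left; rw [if_pos h2]
    · right; rw [if_neg h2]

theorem pvWrite_done (g : PySem.Dict Int (PySem.Dict Int Int)) (t : Int × Int)
    (hwf : pvWF g) (h : pvRd g t = some 2 ∨ pvRd g t = some 3) : pvW g t = g := by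
  have hv : ∃ inner v, g.get? t.1 = some inner ∧ inner.get? t.2 = some v ∧ (v = 2 ∨ v = 3) := by
    unfold pvRd at h
    cases hg : g.get? t.1 with
    | none => rw [hg] at h; simp at h
    | some inner =>
      rw [hg] at h
      simp only [Option.bind_some] at h
      rcases h with h | h
      · exact ⟨inner, 2, rfl, h, Or.inl rfl⟩
      · exact ⟨inner, 3, rfl, h, Or.inr rfl⟩
  obtain ⟨inner, v, hg, hi, hv23⟩ := hv
  have hinnd : inner.keys.Nodup := hwf.2 _ (PySem.Dict.mem_items_of_get?_eq_some g hg)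
  unfold pvW pvWrite
  rw [hg]
  dsimp only
  have hgd : inner.getD t.2 2 = v := by
    rw [PySem.Dict.getD_eq_get?_getD, hi]; rfl
  have hval : (if inner.getD t.2 2 = 2 then (2:Int) else 3) = v := by
    rcases hv23 with h23 | h23 <;> subst h23 <;> simp [hgd]
  rw [hval, pvDictInsertSelf inner t.2 v hinnd hi, pvDictInsertSelf g t.1 inner hwf.1 hg]

theorem pvDD_congr (L : List (Int × Int)) : ∀ (S S' : List (Int × Int)),
    (∀ x, x ∈ S ↔ x ∈ S') → pvDD S L = pvDD S' L := by
  induction L with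
  | nil => intro S S' h; rfl
  | cons t L ih =>
    intro S S' h
    unfold pvDD
    by_cases ht : t ∈ S
    · rw [if_pos ht, if_pos ((h t).1 ht)]
      exact ih S S' h
    · rw [if_neg ht, if_neg (fun hc => ht ((h t).2 hc))]
      refine congrArg _ (ih _ _ ?_)
      intro x
      simp only [List.mem_cons]
      exact or_congr Iff.rfl (h x)

-- deduplicating the write list does not change the result
theorem pvDedup (L : List (Int × Int)) : ∀ (g : PySem.Dict Int (PySem.Dict Int Int)) (S : List (Int × Int)),
    pvWF g →
    (∀ t ∈ S, pvRd g t = some 2 ∨ pvRd g t = some 3) →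
    (∀ t ∈ L, (g.get? t.1).isSome) →
    L.foldl pvW g = (pvDD S L).foldl pvW g := by
  induction L with
  | nil => intro g S hwf hS hL; rfl
  | cons t L ih =>
    intro g S hwf hS hL
    unfold pvDD
    by_cases ht : t ∈ S
    · rw [if_pos ht]
      simp only [List.foldl_cons]
      rw [pvWrite_done g t hwf (hS t ht)]
      exact ih g S hwf hS (fun t' h' => hL t' (List.mem_cons_of_mem _ h'))
    · rw [if_neg ht]
      simp only [List.foldl_cons]
      refine ih (pvW g t) (t :: S) (pvWF_write g t.1 t.2 hwf) ?_ ?_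
      · intro t' h'
        rcases List.mem_cons.1 h' with h' | h'
        · subst h'
          exact pvRd_write_self g t' (hL t' (List.mem_cons_self ..))
        · rw [pvRd_write_other g t t' (fun hc => ht (hc ▸ h'))]
          exact hS t' h'
      · intro t' h'
        have : (pvW g t).keys = g.keys := pvWrite_keys g t.1 t.2
        have h2 := hL t' (List.mem_cons_of_mem _ h')
        cases hx : (pvW g t).get? t'.1 with
        | some _ => rfl
        | none =>
          rw [PySem.Dict.get?_eq_none_iff_not_mem_keys, this,
            ← PySem.Dict.get?_eq_none_iff_not_mem_keys] at hx
          rw [hx] at h2; simp at h2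

-- B's seen-set loop computes the fold of pvW over the deduplicated list
theorem pvSeen (L : List (Int × Int)) : ∀ (S : PySem.Set (Int × Int)) (g : PySem.Dict Int (PySem.Dict Int Int)),
    (L.foldl (fun acc t =>
        if PySem.Set.contains acc.1 t then acc
        else (PySem.Set.add acc.1 t, pvWrite acc.2 t.1 t.2)) (S, g)).2
      = (pvDD S L).foldl pvW g := by
  induction L with
  | nil => intro S g; rfl
  | cons t L ih =>
    intro S g
    simp only [List.foldl_cons]
    unfold pvDD
    by_cases ht : t ∈ S
    · rw [if_pos ((PySem.Set.contains_iff S t).2 ht), if_pos ht]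
      exact ih S g
    · rw [if_neg (by
        intro hc
        exact ht ((PySem.Set.contains_iff S t).1 hc)), if_neg ht]
      simp only [List.foldl_cons]
      rw [ih (S.add t) (pvWrite g t.1 t.2)]
      show List.foldl pvW (pvW g t) (pvDD (S.add t) L) = List.foldl pvW (pvW g t) (pvDD (t :: S) L)
      congr 1
      refine pvDD_congr L _ _ ?_
      intro x
      rw [PySem.Set.mem_add, List.mem_cons]
      exact Or.comm

-- a guarded fold of writes is a fold of pvW over the filtered, mapped list
theorem pvGuardFold (l : List Int) (q : Int → Bool) (f : Int → Int × Int) :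
    ∀ (g : PySem.Dict Int (PySem.Dict Int Int)),
    l.foldl (fun g x => if q x then pvW g (f x) else g) g = ((l.filter q).map f).foldl pvW g := by
  induction l with
  | nil => intro g; rfl
  | cons x l ih =>
    intro g
    simp only [List.foldl_cons, List.filter_cons]
    by_cases hq : q x
    · rw [if_pos hq, hq]
      exact ih (pvW g (f x))
    · rw [if_neg hq, Bool.not_eq_true] at *
      rw [hq]
      simp only [Bool.false_eq_true, if_false]
      exact ih g

theorem pvFoldFlatMap (ks : List Int) (per : Int → List (Int × Int)) :
    ∀ (g : PySem.Dict Int (PySem.Dict Int Int)),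
    ks.foldl (fun g k => (per k).foldl pvW g) g = (ks.flatMap per).foldl pvW g := by
  induction ks with
  | nil => intro g; rfl
  | cons k ks ih =>
    intro g
    simp only [List.foldl_cons, List.flatMap_cons, List.foldl_append]
    exact ih _

-- per-vertex target list, in A's order
def pvPer (d : PySem.Dict Int (PySem.Dict Int Int)) (v1 : Int) : List (Int × Int) :=
  match d.get? v1 with
  | none => []
  | some dv =>
    ((dv.keys.filter (fun e => dv.getD e 0 == 2 || dv.getD e 0 == 3)).map (fun v2 => (v1, v2)))
    ++ (let edges := dv.keys.filter (fun e => dv.getD e 0 == 1 || dv.getD e 0 == 3)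
        edges.flatMap (fun a => (edges.filter (fun b => b != a)).map (fun b => (a, b))))

theorem pvFoldlExt {α β : Type} (f g : α → β → α) (h : ∀ x y, f x y = g x y) (init : α) (l : List β) :
    List.foldl f init l = List.foldl g init l := by
  have : f = g := funext fun x => funext fun y => h x y
  rw [this]

theorem pvWrap_keys (L : List (Int × List (Int × Int))) : (pvWrap L).keys = L.map (·.1) := by
  simp [pvWrap, PySem.Dict.keys_mk, List.map_map, Function.comp]

theorem pvIsSome (g : PySem.Dict Int (PySem.Dict Int Int)) (k : Int) (h : k ∈ g.keys) :
    (g.get? k).isSome := by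
  cases hx : g.get? k with
  | none => exact absurd h ((PySem.Dict.get?_eq_none_iff_not_mem_keys g k).1 hx)
  | some _ => rfl

theorem pvFilterKeys (dv : PySem.Dict Int Int) (hnd : dv.keys.Nodup) (qv : Int → Bool) :
    dv.keys.filter (fun e => qv (dv.getD e 0)) = (dv.items.filter (fun p => qv p.2)).map (fun p => p.1) := by
  have hk : dv.keys = dv.items.map (fun p => p.1) := by simp only [PySem.Dict.keys]
  rw [hk, List.filter_map]
  refine congrArg _ (List.filter_congr ?_)
  intro p hp
  obtain ⟨pk, pv⟩ := p
  simp only [Function.comp]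
  rw [PySem.Dict.getD_of_mem_items dv hp hnd]

-- A's fold is the fold of pvW over the flattened target list
theorem pvA_shape (G D : List (Int × List (Int × Int))) :
    bidirected_inc G D
      = pvUnwrap (((pvWrap G).keys.flatMap (pvPer (pvWrap D))).foldl pvW (pvWrap G)) := by
  unfold bidirected_inc
  rw [← pvFoldFlatMap]
  refine congrArg pvUnwrap (pvFoldlExt _ _ (fun g v1 => ?_) _ _)
  unfold pvPer
  cases hd : (pvWrap D).get? v1 with
  | none => rfl
  | some dv =>
    dsimp only
    rw [List.foldl_append]
    have h1 : List.foldl (fun g v2 => if (dv.getD v2 0 == 2 || dv.getD v2 0 == 3) = true then pvWrite g v1 v2 else g) g dv.keys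
        = List.foldl pvW g ((dv.keys.filter (fun e => dv.getD e 0 == 2 || dv.getD e 0 == 3)).map (fun v2 => (v1, v2))) :=
      pvGuardFold dv.keys _ (fun v2 => (v1, v2)) g
    rw [h1]
    rfl

-- B's target list is the same flattened list
theorem pvB_targets (G D : List (Int × List (Int × Int)))
    (h4 : ∀ p ∈ D, (p.2.map (·.1)).Nodup) :
    ((pvWrap G).keys.flatMap (fun v1 =>
      match (pvWrap D).get? v1 with
      | none => []
      | some row =>
        ((row.items.filter (fun p => p.2 == 2 || p.2 == 3)).map (fun p => (v1, p.1)))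
        ++ (let ch := (row.items.filter (fun p => p.2 == 1 || p.2 == 3)).map (fun p => p.1)
            ch.flatMap (fun a => (ch.filter (fun b => b != a)).map (fun b => (a, b))))))
      = (pvWrap G).keys.flatMap (pvPer (pvWrap D)) := by
  refine congrFun (congrArg List.flatMap (funext fun v1 => ?_)) _
  unfold pvPer
  cases hd : (pvWrap D).get? v1 with
  | none => rfl
  | some dv =>
    have hnd : dv.keys.Nodup := by
      have hmem := PySem.Dict.mem_items_of_get?_eq_some _ hd
      have : (v1, dv) ∈ D.map (fun p => (p.1, PySem.Dict.mk p.2)) := hmem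
      rw [List.mem_map] at this
      obtain ⟨q, hq, hqe⟩ := this
      have : dv = PySem.Dict.mk q.2 := (congrArg Prod.snd hqe).symm
      rw [this, PySem.Dict.keys_mk]
      exact h4 q hq
    dsimp only
    rw [pvFilterKeys dv hnd (fun v => v == 2 || v == 3),
        pvFilterKeys dv hnd (fun v => v == 1 || v == 3), List.map_map]
    rfl

-- ===== VERDICT (by name: the statement is the Claim_ definition above) =====
theorem bidirected_inc_spec : Claim_equal_bidirected_inc := by
  intro G D _ hpre
  obtain ⟨h1, h3, h4, h5, h6⟩ := hpre
  unfold Spec_bidirected_inc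
  have hT := pvB_targets G D h4
  unfold bidirected_inc_alt
  rw [pvA_shape]
  dsimp only
  rw [hT, pvSeen]
  refine congrArg pvUnwrap ?_
  refine pvDedup _ (pvWrap G) PySem.Set.empty ?_ (by intro t h; simp [PySem.Set.empty] at h) ?_
  · constructor
    · rw [pvWrap_keys]; exact h1
    · intro p hp
      have : p ∈ G.map (fun q => (q.1, PySem.Dict.mk q.2)) := hp
      rw [List.mem_map] at this
      obtain ⟨q, hq, hqe⟩ := this
      have : p.2 = PySem.Dict.mk q.2 := (congrArg Prod.snd hqe).symm
      rw [this, PySem.Dict.keys_mk]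
      exact h3 q hq
  · intro t ht
    rw [List.mem_flatMap] at ht
    obtain ⟨v1, hv1, ht⟩ := ht
    unfold pvPer at ht
    cases hd : (pvWrap D).get? v1 with
    | none => rw [hd] at ht; simp at ht
    | some dv =>
      rw [hd] at ht
      dsimp only at ht
      -- the D-row behind dv
      have hmem := PySem.Dict.mem_items_of_get?_eq_some _ hd
      have hqD : ∃ q ∈ D, q.1 = v1 ∧ dv = PySem.Dict.mk q.2 := by
        have : (v1, dv) ∈ D.map (fun p => (p.1, PySem.Dict.mk p.2)) := hmem
        rw [List.mem_map] at this
        obtain ⟨q, hq, hqe⟩ := this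
        exact ⟨q, hq, congrArg Prod.fst hqe, ((congrArg Prod.snd hqe).symm : dv = _)⟩
      obtain ⟨q, hq, hqv, hqe⟩ := hqD
      rcases List.mem_append.1 ht with htr | hpr
      · -- transfer target: first component is v1 itself
        rw [List.mem_map] at htr
        obtain ⟨v2, _, hte⟩ := htr
        have : t.1 = v1 := by rw [← hte]
        rw [this]
        exact pvIsSome _ _ hv1
      · -- pair target: first component is a 1/3-child of the row, in G by Pre_
        simp only [List.mem_flatMap, List.mem_map, List.mem_filter] at hpr
        obtain ⟨a, ⟨hak, haq⟩, b, _, hte⟩ := hpr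
        have ht1 : t.1 = a := by rw [← hte]
        have hpG : ∃ p ∈ G, p.1 = v1 := by
          rw [pvWrap_keys, List.mem_map] at hv1
          obtain ⟨p, hp, hpe⟩ := hv1
          exact ⟨p, hp, hpe⟩
        obtain ⟨p, hp, hpv⟩ := hpG
        have hrq : ∃ r ∈ q.2, r.1 = a := by
          rw [hqe, PySem.Dict.keys_mk, List.mem_map] at hak
          obtain ⟨r, hr, hre⟩ := hak
          exact ⟨r, hr, hre⟩
        obtain ⟨r, hr, hra⟩ := hrq
        have hndq : dv.keys.Nodup := by
          rw [hqe, PySem.Dict.keys_mk]; exact h4 q hq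
        have hrd : dv.getD a 0 = r.2 := by
          have hri : (a, r.2) ∈ dv.items := by
            rw [hqe]
            show (a, r.2) ∈ q.2
            rw [← hra]
            exact hr
          exact PySem.Dict.getD_of_mem_items dv hri hndq 0
        have hr13 : r.2 = 1 ∨ r.2 = 3 := by
          rw [hrd] at haq
          rcases Bool.or_eq_true_iff.1 haq with h | h
          · exact Or.inl (by exact_mod_cast eq_of_beq h)
          · exact Or.inr (by exact_mod_cast eq_of_beq h)
        have := h6 p hp q hq (hqv.trans hpv.symm) r hr hr13
        rw [ht1]
        exact pvIsSome _ _ (by rw [pvWrap_keys]; rw [← hra]; exact this)
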